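-- pv_equiv track=rewrite | github.com/gct02/AHLS | estimators/han/utils/cdfg.py | get_type_bitwidth
-- ===== SOURCE A (Python) =====
-- def get_type_bitwidth(text:str, full_text:str):
--     if text[-1] == '*':
--         return 32 # Placeholder for now
--     if '[' in text: # Array type
--         array_size = int(text.split('[')[1].split(' x ')[0])
--         array_type = text.split(' x ')[1].split(']')[0]
--         array_type_bitwidth = get_type_bitwidth(array_type, full_text)
--         return array_size * array_type_bitwidth
--     if 'void' in text:
--         return 0
--     if 'half' in text:
--         return 16
--     if 'float' in text:
--         return 32
--     if 'double' in text:
--         return 64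
--     if text[0] == 'i':
--         return int(text.strip('i'))
--     if 'vector' in text or ('<' in full_text and '>' in full_text):
--         vector_size = int(full_text.split('<')[1].split(' x ')[0])
--         vector_type = full_text.split(' x ')[1].split('>')[0]
--         vector_type_bitwidth = get_type_bitwidth(vector_type, vector_type)
--         return vector_size * vector_type_bitwidth
--     return 32 # Placeholder for now
-- ===== SOURCE B (Python) =====
-- # B: iterative array peeling with a running multiplier + table-driven leaf dispatch
-- # (A recurses once per array layer and walks an if-chain of keyword tests).
-- _LEAVES = [('void', 0), ('half', 16), ('float', 32), ('double', 64)]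
--
--
-- def _chunk(s, sep, i):
--     return s.split(sep)[i]
--
--
-- def get_type_bitwidth(text, full_text):
--     mult = 1
--     while text[-1] != '*' and '[' in text:
--         mult *= int(_chunk(_chunk(text, '[', 1), ' x ', 0))
--         text = _chunk(text, ' x ', 1).split(']')[0]
--     if text[-1] == '*':
--         return mult * 32
--     for kw, width in _LEAVES:
--         if kw in text:
--             return mult * width
--     if text[0] == 'i':
--         return mult * int(text.strip('i'))
--     if 'vector' in text or ('<' in full_text and '>' in full_text):
--         n = int(_chunk(_chunk(full_text, '<', 1), ' x ', 0))
--         elem = _chunk(full_text, ' x ', 1).split('>')[0]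
--         return mult * n * get_type_bitwidth(elem, elem)
--     return mult * 32
-- ===== Notes on version B (the rewrite author's own statement) =====
-- stated objective: alternative
-- what changed: Array layers are peeled by an iterative while-loop accumulating a multiplier instead of A's self-recursion per layer, and the void/half/float/double keyword if-chain is replaced by a table scan; only the vector branch stays recursive.
import Mathlib
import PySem

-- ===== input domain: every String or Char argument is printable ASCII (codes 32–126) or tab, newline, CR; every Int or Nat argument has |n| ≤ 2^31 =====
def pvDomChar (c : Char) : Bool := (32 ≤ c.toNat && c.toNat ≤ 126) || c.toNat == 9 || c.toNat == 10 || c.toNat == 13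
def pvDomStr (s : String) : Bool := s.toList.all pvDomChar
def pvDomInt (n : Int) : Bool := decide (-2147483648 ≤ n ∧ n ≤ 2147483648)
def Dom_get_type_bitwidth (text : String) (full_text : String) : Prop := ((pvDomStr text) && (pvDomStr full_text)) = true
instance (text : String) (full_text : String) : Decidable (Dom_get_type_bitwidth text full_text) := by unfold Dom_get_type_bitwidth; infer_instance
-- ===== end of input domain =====

-- B peels array layers with an iterative multiplier loop and dispatches leaf keywords through a table
-- instead of A's per-layer self-recursion and if-chain (alternative decomposition, same cost);
-- Pre_ excludes exactly the inputs on which the Python A raises (IndexError/ValueError).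


-- ===== PORT A =====
-- s.split(sep)[i]  (none = IndexError)
def pvASplit (s sep : String) (i : Nat) : Option String :=
  ((PySem.Str.split? s sep).getD [])[i]?

-- fuel-indexed transliteration of A; 0 is returned only where the Python raises.
-- Fuel 4 is exact on EVERY input: an array element chunk (split(' x ')[1]) and a vector element
-- chunk contain no ' x ', so any call at depth 3 raises (split(' x ')[1] IndexError) or returns
-- without recursing — the Python never nests more than 3 calls.
-- one call body of A; `rec` is the self-recursive call (array and vector branches)
def pvAStep (rec : String → String → Int) (text full_text : String) : Int :=
    if PySem.Str.pyGet? text (-1) = none then 0  -- IndexError: text[-1] of ''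
    else if PySem.Str.pyGet? text (-1) = some '*' then 32
    else if PySem.Str.isIn "[" text then
      match pvASplit text "[" 1 with
      | none => 0
      | some s1 =>
        match PySem.Int.ofStr? ((pvASplit s1 " x " 0).getD "") with
        | none => 0  -- ValueError
        | some array_size =>
          match pvASplit text " x " 1 with
          | none => 0
          | some s2 =>
            let array_type := (pvASplit s2 "]" 0).getD ""
            array_size * rec array_type full_text
    else if PySem.Str.isIn "void" text then 0
    else if PySem.Str.isIn "half" text then 16
    else if PySem.Str.isIn "float" text then 32
    else if PySem.Str.isIn "double" text then 64
    else if PySem.Str.pyGet? text 0 = some 'i' then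
      match PySem.Int.ofStr? (PySem.Str.stripChars text "i") with
      | none => 0  -- ValueError
      | some n => n
    else if PySem.Str.isIn "vector" text || (PySem.Str.isIn "<" full_text && PySem.Str.isIn ">" full_text) then
      match pvASplit full_text "<" 1 with
      | none => 0
      | some s1 =>
        match PySem.Int.ofStr? ((pvASplit s1 " x " 0).getD "") with
        | none => 0
        | some vector_size =>
          match pvASplit full_text " x " 1 with
          | none => 0
          | some s2 =>
            let vector_type := (pvASplit s2 ">" 0).getD ""
            vector_size * rec vector_type vector_type
    else 32

def pvAGo : Nat → String → String → Int
  | 0, _, _ => 0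
  | fuel+1, text, full_text => pvAStep (pvAGo fuel) text full_text

def get_type_bitwidth (text : String) (full_text : String) : Int :=
  pvAGo 4 text full_text

-- ===== PORT B =====
-- _chunk(s, sep, i) = s.split(sep)[i]  (none = IndexError)
def pvChunk (s sep : String) (i : Nat) : Option String :=
  ((PySem.Str.split? s sep).getD [])[i]?

-- the _LEAVES keyword table of Source B
def pvLeafTable : List (String × Int) := [("void", 0), ("half", 16), ("float", 32), ("double", 64)]

-- the while-loop of Source B: peel '[N x T]' layers, accumulating the multiplier; none = the loop
-- body raises.  Fuel 3 is exact: the peeled element chunk contains no ' x ', so a second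
-- consuming iteration always returns none (the Python loop body raises there).
def pvPeelStep (next : Int → String → Option (Int × String)) (mult : Int) (text : String) :
    Option (Int × String) :=
    match PySem.Str.pyGet? text (-1) with
    | none => none  -- IndexError: text[-1] of ''
    | some c =>
      if c = '*' ∨ PySem.Str.isIn "[" text = false then some (mult, text)
      else
        match pvChunk text "[" 1 with
        | none => none
        | some h =>
          match PySem.Int.ofStr? ((pvChunk h " x " 0).getD "") with
          | none => none  -- ValueError
          | some sz =>
            match pvChunk text " x " 1 with
            | none => none
            | some tail =>
              next (mult * sz) ((pvChunk tail "]" 0).getD "")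

def pvPeel : Nat → Int → String → Option (Int × String)
  | 0, _, _ => none
  | f+1, mult, text => pvPeelStep (pvPeel f) mult text

-- the dispatch after the loop; `rec` is Source B's self-recursive call (used by the vector branch)
def pvBDisp (rec : String → String → Int) (mult : Int) (t full_text : String) : Int :=
  if PySem.Str.pyGet? t (-1) = some '*' then mult * 32
  else
    match pvLeafTable.find? (fun p => PySem.Str.isIn p.1 t) with
    | some p => mult * p.2
    | none =>
      if PySem.Str.pyGet? t 0 = some 'i' then
        match PySem.Int.ofStr? (PySem.Str.stripChars t "i") with
        | none => 0  -- ValueError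
        | some n => mult * n
      else if PySem.Str.isIn "vector" t || (PySem.Str.isIn "<" full_text && PySem.Str.isIn ">" full_text) then
        match pvChunk full_text "<" 1 with
        | none => 0
        | some h =>
          match PySem.Int.ofStr? ((pvChunk h " x " 0).getD "") with
          | none => 0
          | some n =>
            match pvChunk full_text " x " 1 with
            | none => 0
            | some tail =>
              let elem := (pvChunk tail ">" 0).getD ""
              mult * n * rec elem elem
      else mult * 32

-- fuel only bounds Source B's vector self-recursion; fuel 2 is exact (a vector element chunk
-- contains no ' x ', so a nested call never reaches the recursion again)
def pvBGo : Nat → String → String → Int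
  | 0, _, _ => 0
  | f+1, text, full_text =>
    match pvPeel 3 1 text with
    | none => 0
    | some (mult, t) => pvBDisp (pvBGo f) mult t full_text

def get_type_bitwidth_alt (text : String) (full_text : String) : Int :=
  pvBGo 2 text full_text

-- ===== PRECONDITION & SPEC =====
-- Pre_'s own copy of s.split(sep)[i] (shape condition: "piece i exists")
def pvPiece (s sep : String) (i : Nat) : Option String :=
  ((PySem.Str.split? s sep).getD [])[i]?

def pvStarB (t : String) : Bool := PySem.Str.pyGet? t (-1) == some '*'
def pvWordB (t : String) : Bool :=
  PySem.Str.isIn "void" t || PySem.Str.isIn "half" t || PySem.Str.isIn "float" t || PySem.Str.isIn "double" t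
def pvVecCondB (t ft : String) : Bool :=
  PySem.Str.isIn "vector" t || (PySem.Str.isIn "<" ft && PySem.Str.isIn ">" ft)
def pvIntOkB (s : String) : Bool := (PySem.Int.ofStr? s).isSome
-- the innermost call (t, t): neither the array nor the vector branch may fire (both raise there)
def pvBaseOkB (t : String) : Bool :=
  (PySem.Str.pyGet? t (-1)).isSome &&
  (pvStarB t ||
    (!PySem.Str.isIn "[" t &&
      (pvWordB t ||
        (if PySem.Str.pyGet? t 0 == some 'i' then pvIntOkB (PySem.Str.stripChars t "i")
         else !pvVecCondB t t))))
-- the vector branch parses full_text and recurses on the element chunk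
def pvVecOkB (ft : String) : Bool :=
  (pvPiece ft "<" 1).isSome &&
  pvIntOkB ((pvPiece ((pvPiece ft "<" 1).getD "") " x " 0).getD "") &&
  (pvPiece ft " x " 1).isSome &&
  pvBaseOkB ((pvPiece ((pvPiece ft " x " 1).getD "") ">" 0).getD "")
-- the keyword/'i'/vector/default chain (reached with no '*' and no '[')
def pvRestB (t ft : String) : Bool :=
  pvWordB t ||
  (if PySem.Str.pyGet? t 0 == some 'i' then pvIntOkB (PySem.Str.stripChars t "i")
   else if pvVecCondB t ft then pvVecOkB ft else true)
-- a non-array call (t, ft): the array branch may not fire (its element chunk has no ' x ', so it raises)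
def pvDispOkB (t ft : String) : Bool :=
  (PySem.Str.pyGet? t (-1)).isSome &&
  (pvStarB t || (!PySem.Str.isIn "[" t && pvRestB t ft))

-- Pre_ holds exactly where the Python A returns normally; everything outside raises
-- (IndexError on a missing split piece / empty text, ValueError on a failing int()).
def Pre_get_type_bitwidth (text : String) (full_text : String) : Prop :=
  ((PySem.Str.pyGet? text (-1)).isSome &&
   (pvStarB text ||
     (if PySem.Str.isIn "[" text then
        (pvPiece text "[" 1).isSome &&
        pvIntOkB ((pvPiece ((pvPiece text "[" 1).getD "") " x " 0).getD "") &&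
        (pvPiece text " x " 1).isSome &&
        pvDispOkB ((pvPiece ((pvPiece text " x " 1).getD "") "]" 0).getD "") full_text
      else pvRestB text full_text))) = true

instance (text : String) (full_text : String) : Decidable (Pre_get_type_bitwidth text full_text) := by
  unfold Pre_get_type_bitwidth; infer_instance

def pvWitness_get_type_bitwidth : String × String := ("[4 x i32]", "[4 x i32]")

def Spec_get_type_bitwidth (text : String) (full_text : String) (out : Int) : Prop := out = get_type_bitwidth_alt text full_text
instance (text : String) (full_text : String) (out : Int) : Decidable (Spec_get_type_bitwidth text full_text out) := by unfold Spec_get_type_bitwidth; infer_instance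

-- ===== CLAIM (what is proved, stated in full; the proofs are below) =====
def Claim_equal_get_type_bitwidth : Prop := ∀ (text : String) (full_text : String), Dom_get_type_bitwidth text full_text → Pre_get_type_bitwidth text full_text → Spec_get_type_bitwidth text full_text (get_type_bitwidth text full_text)

-- ===== LEMMAS AND PROOFS =====

-- the value of the leaf dispatch (no array, vector branch unreachable or absent)
def pvLeafVal (t : String) : Int :=
  if PySem.Str.pyGet? t (-1) = some '*' then 32
  else if PySem.Str.isIn "void" t then 0
  else if PySem.Str.isIn "half" t then 16
  else if PySem.Str.isIn "float" t then 32
  else if PySem.Str.isIn "double" t then 64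
  else if PySem.Str.pyGet? t 0 = some 'i' then (PySem.Int.ofStr? (PySem.Str.stripChars t "i")).getD 0
  else 32

def pvVelem (ft : String) : String :=
  (pvPiece ((pvPiece ft " x " 1).getD "") ">" 0).getD ""
def pvVsize (ft : String) : Int :=
  (PySem.Int.ofStr? ((pvPiece ((pvPiece ft "<" 1).getD "") " x " 0).getD "")).getD 0

-- the value of a non-array call (t, ft)
def pvDispVal (t ft : String) : Int :=
  if PySem.Str.pyGet? t (-1) = some '*' then 32
  else if PySem.Str.isIn "void" t then 0
  else if PySem.Str.isIn "half" t then 16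
  else if PySem.Str.isIn "float" t then 32
  else if PySem.Str.isIn "double" t then 64
  else if PySem.Str.pyGet? t 0 = some 'i' then (PySem.Int.ofStr? (PySem.Str.stripChars t "i")).getD 0
  else if PySem.Str.isIn "vector" t || (PySem.Str.isIn "<" ft && PySem.Str.isIn ">" ft) then
    pvVsize ft * pvLeafVal (pvVelem ft)
  else 32

theorem pvASplit_eq_piece : pvASplit = pvPiece := rfl
theorem pvChunk_eq_piece : pvChunk = pvPiece := rfl

theorem pvAGo_succ (f : Nat) (t ft : String) : pvAGo (f+1) t ft = pvAStep (pvAGo f) t ft := rfl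
theorem pvPeel_succ (f : Nat) (m : Int) (t : String) :
    pvPeel (f+1) m t = pvPeelStep (pvPeel f) m t := rfl
theorem pvBGo_succ (f : Nat) (t ft : String) :
    pvBGo (f+1) t ft =
      (match pvPeel 3 1 t with
       | none => 0
       | some (mult, u) => pvBDisp (pvBGo f) mult u ft) := rfl

theorem pvNotNone (t : String) (h : (PySem.Str.pyGet? t (-1)).isSome = true) :
    ¬ PySem.Str.pyGet? t (-1) = none := by
  intro hn; rw [hn] at h; simp at h

theorem pvA_base (rec : String → String → Int) (t : String) (h : pvBaseOkB t = true) :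
    pvAStep rec t t = pvLeafVal t := by
  unfold pvBaseOkB at h
  simp only [Bool.and_eq_true, Bool.or_eq_true, Bool.not_eq_true'] at h
  obtain ⟨hne, hcase⟩ := h
  have h0 := pvNotNone t hne
  simp only [pvAStep, pvLeafVal, if_neg h0]
  rcases hcase with hstar | ⟨hbr, hrest⟩
  · have hstar' : PySem.Str.pyGet? t (-1) = some '*' := by
      simpa [pvStarB] using hstar
    simp only [if_pos hstar']
  · by_cases hstar : PySem.Str.pyGet? t (-1) = some '*'
    · simp only [if_pos hstar]
    · simp only [if_neg hstar, hbr, Bool.false_eq_true, if_false]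
      split_ifs with h2 h3 h4 h5 h6 h7
      · rfl
      · rfl
      · rfl
      · rfl
      · cases hv : PySem.Int.ofStr? (PySem.Str.stripChars t "i") <;> rfl
      · -- the vector branch is unreachable: pvBaseOkB forces its condition to be false
        exfalso
        rcases hrest with hw | hrest
        · unfold pvWordB at hw
          rcases Bool.or_eq_true_iff.mp hw with hw | hw
          · rcases Bool.or_eq_true_iff.mp hw with hw | hw
            · rcases Bool.or_eq_true_iff.mp hw with hw | hw
              exacts [h2 hw, h3 hw]
            · exact h4 hw
          · exact h5 hw
        · rw [if_neg (by simpa using h6)] at hrest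
          have hv : pvVecCondB t t = false := by simpa using hrest
          unfold pvVecCondB at hv
          rw [h7] at hv
          simp at hv
      · rfl

theorem pvVecOk_parts (t ft : String)
    (hrest : pvRestB t ft = true)
    (h2 : ¬ PySem.Str.isIn "void" t = true) (h3 : ¬ PySem.Str.isIn "half" t = true)
    (h4 : ¬ PySem.Str.isIn "float" t = true) (h5 : ¬ PySem.Str.isIn "double" t = true)
    (h6 : ¬ PySem.Str.pyGet? t 0 = some 'i')
    (h7 : (PySem.Str.isIn "vector" t || (PySem.Str.isIn "<" ft && PySem.Str.isIn ">" ft)) = true) :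
    pvVecOkB ft = true := by
  unfold pvRestB at hrest
  rcases Bool.or_eq_true_iff.mp hrest with hw | hrest
  · exfalso
    unfold pvWordB at hw
    rcases Bool.or_eq_true_iff.mp hw with hw | hw
    · rcases Bool.or_eq_true_iff.mp hw with hw | hw
      · rcases Bool.or_eq_true_iff.mp hw with hw | hw
        exacts [h2 hw, h3 hw]
      · exact h4 hw
    · exact h5 hw
  · rw [if_neg (by simpa using h6)] at hrest
    rw [if_pos (show pvVecCondB t ft = true from by unfold pvVecCondB; exact h7)] at hrest
    exact hrest

theorem pvA_disp (rec : String → String → Int) (t ft : String) (h : pvDispOkB t ft = true)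
    (hrec : pvStarB t = false → pvWordB t = false → PySem.Str.pyGet? t 0 ≠ some 'i' →
            pvVecCondB t ft = true → rec (pvVelem ft) (pvVelem ft) = pvLeafVal (pvVelem ft)) :
    pvAStep rec t ft = pvDispVal t ft := by
  unfold pvDispOkB at h
  simp only [Bool.and_eq_true, Bool.or_eq_true, Bool.not_eq_true'] at h
  obtain ⟨hne, hcase⟩ := h
  have h0 := pvNotNone t hne
  simp only [pvAStep, pvDispVal, if_neg h0]
  rcases hcase with hstar | ⟨hbr, hrest⟩
  · have hstar' : PySem.Str.pyGet? t (-1) = some '*' := by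
      simpa [pvStarB] using hstar
    simp only [if_pos hstar']
  · by_cases hstar : PySem.Str.pyGet? t (-1) = some '*'
    · simp only [if_pos hstar]
    · simp only [if_neg hstar, hbr, Bool.false_eq_true, if_false]
      split_ifs with h2 h3 h4 h5 h6 h7
      · rfl
      · rfl
      · rfl
      · rfl
      · cases hv : PySem.Int.ofStr? (PySem.Str.stripChars t "i") <;> rfl
      · -- the vector branch: Pre_ guarantees every split piece exists and the size parses
        have hvec := pvVecOk_parts t ft hrest h2 h3 h4 h5 h6 h7
        unfold pvVecOkB at hvec
        simp only [Bool.and_eq_true] at hvec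
        obtain ⟨⟨⟨hlt, hsz⟩, hx⟩, hbase⟩ := hvec
        obtain ⟨s1, hs1⟩ := Option.isSome_iff_exists.mp hlt
        obtain ⟨tail, htail⟩ := Option.isSome_iff_exists.mp hx
        rw [hs1, Option.getD_some] at hsz
        rw [htail, Option.getD_some] at hbase
        unfold pvIntOkB at hsz
        obtain ⟨n, hn⟩ := Option.isSome_iff_exists.mp hsz
        have hrec' := hrec (by unfold pvStarB; simpa using hstar)
          (by
            unfold pvWordB
            exact Bool.or_eq_false_iff.mpr ⟨Bool.or_eq_false_iff.mpr
              ⟨Bool.or_eq_false_iff.mpr ⟨Bool.eq_false_iff.mpr h2, Bool.eq_false_iff.mpr h3⟩,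
               Bool.eq_false_iff.mpr h4⟩, Bool.eq_false_iff.mpr h5⟩) h6
          (by unfold pvVecCondB; exact h7)
        unfold pvVelem at hrec'
        rw [htail, Option.getD_some] at hrec'
        simp only [pvASplit_eq_piece, hs1, htail, hn, hrec']
        unfold pvVsize pvVelem
        rw [hs1, htail]
        simp only [Option.getD_some, hn]
      · rfl

theorem pvPeel_exit (f : Nat) (m : Int) (t : String)
    (h1 : (PySem.Str.pyGet? t (-1)).isSome = true)
    (h2 : pvStarB t = true ∨ PySem.Str.isIn "[" t = false) :
    pvPeel (f+1) m t = some (m, t) := by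
  obtain ⟨c, hc⟩ := Option.isSome_iff_exists.mp h1
  rcases h2 with hstar | hnb
  · have hs : PySem.Str.pyGet? t (-1) = some '*' := by simpa [pvStarB] using hstar
    have hc' : c = '*' := by rw [hs] at hc; exact (Option.some.inj hc).symm
    rw [pvPeel_succ]
    unfold pvPeelStep
    simp only [hc]
    rw [if_pos (Or.inl hc')]
  · rw [pvPeel_succ]
    unfold pvPeelStep
    simp only [hc]
    rw [if_pos (Or.inr hnb)]

theorem pvRestB_vecOk (t ft : String) (hrest : pvRestB t ft = true)
    (hw : pvWordB t = false) (hi : ¬ PySem.Str.pyGet? t 0 = some 'i')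
    (hv : pvVecCondB t ft = true) : pvVecOkB ft = true := by
  unfold pvRestB at hrest
  rcases Bool.or_eq_true_iff.mp hrest with h | h
  · rw [hw] at h; exact absurd h (by simp)
  · rwa [if_neg (by simpa using hi), if_pos hv] at h

theorem pvVecOk_base (ft : String) (h : pvVecOkB ft = true) :
    pvBaseOkB (pvVelem ft) = true := by
  unfold pvVecOkB at h
  simp only [Bool.and_eq_true] at h
  unfold pvVelem
  exact h.2

theorem pvB_disp (rec : String → String → Int) (m : Int) (t ft : String)
    (h : pvDispOkB t ft = true)
    (hrec : pvStarB t = false → pvWordB t = false → PySem.Str.pyGet? t 0 ≠ some 'i' →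
            pvVecCondB t ft = true → rec (pvVelem ft) (pvVelem ft) = pvLeafVal (pvVelem ft)) :
    pvBDisp rec m t ft = m * pvDispVal t ft := by
  unfold pvDispOkB at h
  simp only [Bool.and_eq_true, Bool.or_eq_true, Bool.not_eq_true'] at h
  obtain ⟨hne, hcase⟩ := h
  by_cases hstar : PySem.Str.pyGet? t (-1) = some '*'
  · simp only [pvBDisp, pvDispVal, if_pos hstar]
  · have hstarb : pvStarB t = false := by
      unfold pvStarB; simpa using hstar
    have hrest : pvRestB t ft = true := by
      rcases hcase with hs | ⟨_, hr⟩
      · exact absurd (by simpa [pvStarB] using hs) hstar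
      · exact hr
    simp only [pvBDisp, pvDispVal, pvLeafTable, if_neg hstar]
    by_cases h2 : PySem.Str.isIn "void" t = true
    · rw [List.find?_cons_of_pos (by simpa using h2)]
      simp only [if_pos h2]
    · rw [List.find?_cons_of_neg (by simpa using h2)]
      simp only [if_neg h2]
      by_cases h3 : PySem.Str.isIn "half" t = true
      · rw [List.find?_cons_of_pos (by simpa using h3)]
        simp only [if_pos h3]
      · rw [List.find?_cons_of_neg (by simpa using h3)]
        simp only [if_neg h3]
        by_cases h4 : PySem.Str.isIn "float" t = true
        · rw [List.find?_cons_of_pos (by simpa using h4)]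
          simp only [if_pos h4]
        · rw [List.find?_cons_of_neg (by simpa using h4)]
          simp only [if_neg h4]
          by_cases h5 : PySem.Str.isIn "double" t = true
          · rw [List.find?_cons_of_pos (by simpa using h5)]
            simp only [if_pos h5]
          · rw [List.find?_cons_of_neg (by simpa using h5)]
            simp only [if_neg h5, List.find?_nil]
            have hwf : pvWordB t = false := by
              unfold pvWordB
              exact Bool.or_eq_false_iff.mpr ⟨Bool.or_eq_false_iff.mpr
                ⟨Bool.or_eq_false_iff.mpr ⟨Bool.eq_false_iff.mpr h2, Bool.eq_false_iff.mpr h3⟩,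
                 Bool.eq_false_iff.mpr h4⟩, Bool.eq_false_iff.mpr h5⟩
            by_cases h6 : PySem.Str.pyGet? t 0 = some 'i'
            · simp only [if_pos h6]
              have hok : pvIntOkB (PySem.Str.stripChars t "i") = true := by
                unfold pvRestB at hrest
                rcases Bool.or_eq_true_iff.mp hrest with hw | hr
                · rw [hwf] at hw; exact absurd hw (by simp)
                · rwa [if_pos (by simpa using h6)] at hr
              obtain ⟨n, hn⟩ := Option.isSome_iff_exists.mp hok
              simp only [hn, Option.getD_some]
            · simp only [if_neg h6]
              by_cases h7 : (PySem.Str.isIn "vector" t || (PySem.Str.isIn "<" ft && PySem.Str.isIn ">" ft)) = true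
              · simp only [if_pos h7]
                have hvec := pvRestB_vecOk t ft hrest hwf h6 (by unfold pvVecCondB; exact h7)
                have hrec' := hrec hstarb hwf h6 (by unfold pvVecCondB; exact h7)
                unfold pvVecOkB at hvec
                simp only [Bool.and_eq_true] at hvec
                obtain ⟨⟨⟨hlt, hsz⟩, hx⟩, _⟩ := hvec
                obtain ⟨s1, hs1⟩ := Option.isSome_iff_exists.mp hlt
                obtain ⟨tail, htail⟩ := Option.isSome_iff_exists.mp hx
                rw [hs1, Option.getD_some] at hsz
                unfold pvIntOkB at hsz
                obtain ⟨n, hn⟩ := Option.isSome_iff_exists.mp hsz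
                unfold pvVelem at hrec'
                rw [htail, Option.getD_some] at hrec'
                simp only [pvChunk_eq_piece, hs1, htail, hn, hrec']
                unfold pvVsize pvVelem
                rw [hs1, htail]
                simp only [Option.getD_some, hn]
                ring
              · simp only [if_neg h7]

set_option maxHeartbeats 1000000 in
theorem pvDispOk_of_base (t : String) (h : pvBaseOkB t = true) :
    pvDispOkB t t = true := by
  unfold pvBaseOkB at h
  unfold pvDispOkB pvRestB
  simp only [Bool.and_eq_true, Bool.or_eq_true, Bool.not_eq_true'] at h ⊢
  obtain ⟨hne, hcase⟩ := h
  refine ⟨hne, ?_⟩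
  rcases hcase with hs | ⟨hb, hr⟩
  · exact Or.inl hs
  · refine Or.inr ⟨hb, ?_⟩
    rcases hr with hw | hr
    · exact Or.inl hw
    · right
      by_cases hi : (PySem.Str.pyGet? t 0 == some 'i') = true
      · rwa [if_pos hi] at hr ⊢
      · rw [if_neg hi] at hr ⊢
        have hv : pvVecCondB t t = false := (Bool.not_eq_true' _ ▸ hr)
        rw [if_neg (fun hc => Bool.false_ne_true (by rw [hv] at hc; exact hc))]

theorem pvDispVal_of_base (t : String) (h : pvBaseOkB t = true) :
    pvDispVal t t = pvLeafVal t := by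
  unfold pvBaseOkB at h
  simp only [Bool.and_eq_true, Bool.or_eq_true, Bool.not_eq_true'] at h
  obtain ⟨hne, hcase⟩ := h
  unfold pvDispVal pvLeafVal
  by_cases h1 : PySem.Str.pyGet? t (-1) = some '*'
  · simp only [if_pos h1]
  · simp only [if_neg h1]
    by_cases h2 : PySem.Str.isIn "void" t = true
    · simp only [if_pos h2]
    · simp only [if_neg h2]
      by_cases h3 : PySem.Str.isIn "half" t = true
      · simp only [if_pos h3]
      · simp only [if_neg h3]
        by_cases h4 : PySem.Str.isIn "float" t = true
        · simp only [if_pos h4]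
        · simp only [if_neg h4]
          by_cases h5 : PySem.Str.isIn "double" t = true
          · simp only [if_pos h5]
          · simp only [if_neg h5]
            by_cases h6 : PySem.Str.pyGet? t 0 = some 'i'
            · simp only [if_pos h6]
            · simp only [if_neg h6]
              -- the vector condition is false under pvBaseOkB
              have hv : pvVecCondB t t = false := by
                rcases hcase with hs | ⟨hb, hr⟩
                · exact absurd (by simpa [pvStarB] using hs) h1
                · rcases hr with hw | hr
                  · exfalso
                    unfold pvWordB at hw
                    rcases Bool.or_eq_true_iff.mp hw with hw | hw
                    · rcases Bool.or_eq_true_iff.mp hw with hw | hw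
                      · rcases Bool.or_eq_true_iff.mp hw with hw | hw
                        exacts [h2 hw, h3 hw]
                      · exact h4 hw
                    · exact h5 hw
                  · rw [if_neg (by simpa using h6)] at hr
                    exact Bool.not_eq_true' _ ▸ hr
              unfold pvVecCondB at hv
              rw [if_neg (fun hc => Bool.false_ne_true (by rw [hv] at hc; exact hc))]

theorem pvB_base (f : Nat) (t : String) (h : pvBaseOkB t = true) :
    pvBGo (f+1) t t = pvLeafVal t := by
  have h' := h
  unfold pvBaseOkB at h'
  simp only [Bool.and_eq_true, Bool.or_eq_true, Bool.not_eq_true'] at h'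
  obtain ⟨hne, hcase⟩ := h'
  have hexit : pvStarB t = true ∨ PySem.Str.isIn "[" t = false := by
    rcases hcase with hs | ⟨hb, _⟩
    exacts [Or.inl hs, Or.inr hb]
  rw [pvBGo_succ, pvPeel_exit 2 1 t hne hexit]
  show pvBDisp (pvBGo f) 1 t t = pvLeafVal t
  rw [pvB_disp (pvBGo f) 1 t t (pvDispOk_of_base t h) ?hrec]
  · rw [one_mul, pvDispVal_of_base t h]
  case hrec =>
    intro hs hw hi hv
    exfalso
    rcases hcase with hs' | ⟨hb, hr⟩
    · rw [hs] at hs'; exact absurd hs' (by simp)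
    · rcases hr with hw' | hr
      · rw [hw] at hw'; exact absurd hw' (by simp)
      · rw [if_neg (by simpa using hi)] at hr
        have hvf : pvVecCondB t t = false := (Bool.not_eq_true' _ ▸ hr)
        rw [hv] at hvf
        simp at hvf

theorem pvDispOk_parts (t ft : String) (h : pvDispOkB t ft = true) :
    (PySem.Str.pyGet? t (-1)).isSome = true ∧
      (pvStarB t = true ∨ (PySem.Str.isIn "[" t = false ∧ pvRestB t ft = true)) := by
  unfold pvDispOkB at h
  simp only [Bool.and_eq_true, Bool.or_eq_true, Bool.not_eq_true'] at h
  exact h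

theorem pvDispOk_rest (t ft : String) (h : pvDispOkB t ft = true)
    (hs : pvStarB t = false) : pvRestB t ft = true := by
  rcases (pvDispOk_parts t ft h).2 with hs' | ⟨_, hr⟩
  · rw [hs] at hs'; exact absurd hs' (by simp)
  · exact hr

theorem pvAStep_disp (f : Nat) (t ft : String) (h : pvDispOkB t ft = true) :
    pvAStep (pvAGo (f+1)) t ft = pvDispVal t ft := by
  apply pvA_disp _ _ _ h
  intro hs hw hi hv
  have hbase := pvVecOk_base ft (pvRestB_vecOk t ft (pvDispOk_rest t ft h hs) hw hi hv)
  show pvAGo (f+1) (pvVelem ft) (pvVelem ft) = pvLeafVal (pvVelem ft)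
  rw [pvAGo_succ]
  exact pvA_base _ _ hbase

theorem pvBDisp_disp (f : Nat) (m : Int) (t ft : String) (h : pvDispOkB t ft = true) :
    pvBDisp (pvBGo (f+1)) m t ft = m * pvDispVal t ft := by
  apply pvB_disp _ _ _ _ h
  intro hs hw hi hv
  exact pvB_base f _ (pvVecOk_base ft (pvRestB_vecOk t ft (pvDispOk_rest t ft h hs) hw hi hv))

-- ===== VERDICT (by name: the statement is the Claim_ definition above) =====
theorem get_type_bitwidth_spec : Claim_equal_get_type_bitwidth := by
  intro text ft _ hpre
  unfold Spec_get_type_bitwidth get_type_bitwidth get_type_bitwidth_alt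
  unfold Pre_get_type_bitwidth at hpre
  simp only [Bool.and_eq_true, Bool.or_eq_true] at hpre
  obtain ⟨hne, hcase⟩ := hpre
  show pvAGo (3+1) text ft = pvBGo (1+1) text ft
  rw [pvAGo_succ, pvBGo_succ]
  by_cases hstar : pvStarB text = true
  · have hdisp : pvDispOkB text ft = true := by
      unfold pvDispOkB
      simp only [Bool.and_eq_true, Bool.or_eq_true]
      exact ⟨hne, Or.inl hstar⟩
    rw [pvPeel_exit 2 1 text hne (Or.inl hstar)]
    show pvAStep (pvAGo 3) text ft = pvBDisp (pvBGo 1) 1 text ft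
    rw [pvAStep_disp 2 text ft hdisp, pvBDisp_disp 0 1 text ft hdisp, one_mul]
  · have hsf : pvStarB text = false := Bool.eq_false_iff.mpr hstar
    have hstar' : ¬ PySem.Str.pyGet? text (-1) = some '*' := by
      simpa [pvStarB] using hsf
    rcases hcase with hs | hite
    · exact absurd hs hstar
    · by_cases hb : PySem.Str.isIn "[" text = true
      · -- array case: A recurses once, B runs one loop iteration
        rw [if_pos hb] at hite
        simp only [Bool.and_eq_true] at hite
        obtain ⟨⟨⟨hp1, hsz⟩, hx⟩, hdi⟩ := hite
        obtain ⟨s1, hs1⟩ := Option.isSome_iff_exists.mp hp1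
        obtain ⟨tail, htail⟩ := Option.isSome_iff_exists.mp hx
        rw [hs1, Option.getD_some] at hsz
        rw [htail, Option.getD_some] at hdi
        unfold pvIntOkB at hsz
        obtain ⟨sz, hn⟩ := Option.isSome_iff_exists.mp hsz
        obtain ⟨c, hc⟩ := Option.isSome_iff_exists.mp hne
        obtain ⟨hdi_ne, hdi_or⟩ := pvDispOk_parts _ ft hdi
        have hdi_exit : pvStarB ((pvPiece tail "]" 0).getD "") = true ∨
            PySem.Str.isIn "[" ((pvPiece tail "]" 0).getD "") = false := by
          rcases hdi_or with hx' | ⟨hx', _⟩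
          exacts [Or.inl hx', Or.inr hx']
        have hA : pvAStep (pvAGo 3) text ft =
            sz * pvDispVal ((pvPiece tail "]" 0).getD "") ft := by
          unfold pvAStep
          rw [if_neg (pvNotNone text hne), if_neg hstar', if_pos hb]
          simp only [pvASplit_eq_piece, hs1, hn, htail]
          show sz * pvAStep (pvAGo 2) ((pvPiece tail "]" 0).getD "") ft = _
          exact congrArg (fun z => sz * z) (pvAStep_disp 1 _ ft hdi)
        have hpeel : pvPeel 3 1 text = some (1 * sz, (pvPiece tail "]" 0).getD "") := by
          show pvPeel (2+1) 1 text = _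
          rw [pvPeel_succ]
          unfold pvPeelStep
          simp only [hc]
          rw [if_neg ?hcond]
          case hcond =>
            rintro (hc' | hbf)
            · rw [hc'] at hc; exact hstar' hc
            · rw [hb] at hbf; exact Bool.true_eq_false.mp hbf
          simp only [pvChunk_eq_piece, hs1, hn, htail]
          exact pvPeel_exit 1 (1 * sz) _ hdi_ne hdi_exit
        rw [hA, hpeel]
        show _ = pvBDisp (pvBGo 1) (1 * sz) _ ft
        rw [pvBDisp_disp 0 (1 * sz) _ ft hdi]
        ring
      · -- non-array case: B's loop exits immediately
        rw [if_neg hb] at hite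
        have hbf : PySem.Str.isIn "[" text = false := Bool.eq_false_iff.mpr hb
        have hdisp : pvDispOkB text ft = true := by
          unfold pvDispOkB
          simp only [Bool.and_eq_true, Bool.or_eq_true, Bool.not_eq_true']
          exact ⟨hne, Or.inr ⟨hbf, hite⟩⟩
        rw [pvPeel_exit 2 1 text hne (Or.inr hbf)]
        show pvAStep (pvAGo 3) text ft = pvBDisp (pvBGo 1) 1 text ft
        rw [pvAStep_disp 2 text ft hdisp, pvBDisp_disp 0 1 text ft hdisp, one_mul]
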